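-- pv_equiv track=rewrite | github.com/raeKhan225/Finding-Repetition-in-Genomes | Spike Work/Find2Mers/main.py | microsat_dict_func
-- ===== SOURCE A (Python) =====
-- def microsat_dict_func(genome, repeat_length):
--     # Initialising dict
--     microsat_dict = {}
--
--     for i in range(0, len(genome), repeat_length):
--         microsat = genome[i:i + repeat_length]
--         # Checks if microsatellite is in dict
--         if microsat in microsat_dict:
--             microsat_dict[microsat] = microsat_dict[microsat] + 1
--
--         # Adding microsatellite to dictionary if not already in the dictionary
--         else:
--             microsat_dict[microsat] = 1
--     return microsat_dict
-- ===== SOURCE B (Python) =====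
-- def microsat_dict_func(genome, repeat_length):
--     # Recursive partition counting: take the first chunk, count it by removing
--     # all of its occurrences from the rest, then recurse on what is left.
--     chunks = [genome[i:i + repeat_length] for i in range(0, len(genome), repeat_length)]
--
--     def partition(cs):
--         if not cs:
--             return {}
--         m = cs[0]
--         rest = [c for c in cs[1:] if c != m]
--         out = {m: len(cs) - len(rest)}
--         out.update(partition(rest))
--         return out
--
--     return partition(chunks)
-- ===== Notes on version B (the rewrite author's own statement) =====
-- stated objective: alternative
-- what changed: B replaces A's single-pass dict-accumulating loop by a recursive partition: slice the chunk list once, then repeatedly take the first chunk, count it by filtering all its occurrences out of the rest, and recurse on the remainder.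
import Mathlib
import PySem

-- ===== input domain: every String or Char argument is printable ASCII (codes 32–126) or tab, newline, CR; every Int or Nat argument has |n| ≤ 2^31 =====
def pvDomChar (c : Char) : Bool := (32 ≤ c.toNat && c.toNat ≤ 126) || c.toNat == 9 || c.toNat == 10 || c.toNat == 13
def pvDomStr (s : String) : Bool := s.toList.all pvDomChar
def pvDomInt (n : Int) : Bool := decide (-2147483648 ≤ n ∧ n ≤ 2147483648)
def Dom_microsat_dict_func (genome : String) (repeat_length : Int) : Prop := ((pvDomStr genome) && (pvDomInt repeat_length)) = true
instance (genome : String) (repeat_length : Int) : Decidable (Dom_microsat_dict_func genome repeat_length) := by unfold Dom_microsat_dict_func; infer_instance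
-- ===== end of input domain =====

-- B replaces A's dict-accumulating loop by a recursive partition: count the first chunk by
-- filtering out its occurrences, then recurse on the remainder (objective: alternative).
-- ===== PORT A =====
def microsat_dict_func (genome : String) (repeat_length : Int) : List (String × Int) :=
  (PySem.List.pyRange 0 (PySem.Str.len genome) repeat_length).foldl
    (fun microsat_dict i =>
      let microsat := PySem.Str.slice genome (some i) (some (i + repeat_length))
      -- 'if microsat in microsat_dict: d[microsat] = d[microsat] + 1 else: d[microsat] = 1'
      match microsat_dict.get? microsat with
      | some v => microsat_dict.insert microsat (v + 1)
      | none => microsat_dict.insert microsat 1)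
    PySem.Dict.empty |>.items

-- ===== PORT B =====
-- Source B's inner 'partition': head chunk, filter its occurrences out of the tail, recurse.
-- 'out.update(partition(rest))' is a cons here: 'rest' contains no occurrence of the head
-- chunk, so the recursive dict never holds that key and the update only appends entries.
def pvPartition : List String → List (String × Int)
  | [] => []
  | m :: tl =>
    let rest := tl.filter (fun c => c ≠ m)
    (m, ((m :: tl).length : Int) - (rest.length : Int)) :: pvPartition rest
termination_by cs => cs.length
decreasing_by
  have h := List.length_filter_le (fun (x : {x // x ∈ tl}) => !decide ((x : String) = m)) tl.attach
  simp at h ⊢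
  omega

def microsat_dict_func_alt (genome : String) (repeat_length : Int) : List (String × Int) :=
  let chunks := (PySem.List.pyRange 0 (PySem.Str.len genome) repeat_length).map
    (fun i => PySem.Str.slice genome (some i) (some (i + repeat_length)))
  pvPartition chunks

-- ===== PRECONDITION & SPEC =====
-- Pre_ excludes repeat_length = 0, where Python's range(0, len(genome), 0) raises ValueError.
def Pre_microsat_dict_func (_genome : String) (repeat_length : Int) : Prop := repeat_length ≠ 0
instance (genome : String) (repeat_length : Int) : Decidable (Pre_microsat_dict_func genome repeat_length) := by unfold Pre_microsat_dict_func; infer_instance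
def pvWitness_microsat_dict_func : String × Int := ("ACGTAC", 2)

def Spec_microsat_dict_func (genome : String) (repeat_length : Int) (out : List (String × Int)) : Prop := out = microsat_dict_func_alt genome repeat_length
instance (genome : String) (repeat_length : Int) (out : List (String × Int)) : Decidable (Spec_microsat_dict_func genome repeat_length out) := by unfold Spec_microsat_dict_func; infer_instance

-- ===== CLAIM (what is proved, stated in full; the proofs are below) =====
def Claim_equal_microsat_dict_func : Prop := ∀ (genome : String) (repeat_length : Int), Dom_microsat_dict_func genome repeat_length → Pre_microsat_dict_func genome repeat_length → Spec_microsat_dict_func genome repeat_length (microsat_dict_func genome repeat_length)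

-- ===== LEMMAS AND PROOFS =====
-- A's loop body, as a standalone step function (definitionally A's fold body after substituting the chunk).
def stepA (d : PySem.Dict String Int) (x : String) : PySem.Dict String Int :=
  match d.get? x with
  | some v => d.insert x (v + 1)
  | none => d.insert x 1

-- A's two-branch dict update is pointwise the 'insert x (getD x 0 + 1)' counter step.
theorem stepA_eq_counter_step :
    stepA = (fun (d : PySem.Dict String Int) (x : String) => d.insert x (d.getD x 0 + 1)) := by
  funext d x
  unfold stepA
  cases h : d.get? x with
  | some v => simp [PySem.Dict.getD_eq_get?_getD, h]
  | none => simp [PySem.Dict.getD_eq_get?_getD, h]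

-- Pushing a fresh head through PySem.Set.ofList's foldl: elements equal to the head are no-ops,
-- the rest build up behind it.
theorem foldl_add_cons (x : String) : ∀ (l : List String) (s : List String),
    List.foldl PySem.Set.add (x :: s) l
      = x :: List.foldl PySem.Set.add s (l.filter (fun c => c ≠ x)) := by
  intro l
  induction l with
  | nil => intro s; simp
  | cons c tl ih =>
    intro s
    by_cases hcx : c = x
    · subst hcx
      simp [PySem.Set.add, PySem.Set.contains, ih]
    · have hfil : List.filter (fun c => decide (c ≠ x)) (c :: tl)
          = c :: List.filter (fun c => decide (c ≠ x)) tl :=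
        List.filter_cons_of_pos (by simp [hcx])
      rw [List.foldl_cons, hfil, List.foldl_cons]
      by_cases hcs : c ∈ s
      · have h1 : PySem.Set.add (x :: s) c = x :: s := by
          simp [PySem.Set.add, PySem.Set.contains, hcs]
        have h2 : PySem.Set.add s c = s := by
          simp [PySem.Set.add, PySem.Set.contains, hcs]
        rw [h1, h2, ih]
      · have h1 : PySem.Set.add (x :: s) c = x :: (s ++ [c]) := by
          simp [PySem.Set.add, PySem.Set.contains, hcs, hcx]
        have h2 : PySem.Set.add s c = s ++ [c] := by
          simp [PySem.Set.add, PySem.Set.contains, hcs]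
        rw [h1, h2, ih]

-- First-occurrence dedup as B's partition sees it: head first, then dedup of the filtered tail.
theorem dedup_cons (x : String) (l : List String) :
    PySem.List.dedup (x :: l) = x :: PySem.List.dedup (l.filter (fun c => c ≠ x)) := by
  show List.foldl PySem.Set.add PySem.Set.empty (x :: l) = _
  have h0 : PySem.Set.add PySem.Set.empty x = [x] := by
    simp [PySem.Set.add, PySem.Set.contains, PySem.Set.empty]
  rw [List.foldl_cons, h0]
  exact foldl_add_cons x l []

-- A list splits into its elements equal to x and the rest.
theorem length_filter_count (x : String) : ∀ (l : List String),
    l.length = (l.filter (fun c => c ≠ x)).length + l.count x := by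
  intro l
  induction l with
  | nil => simp
  | cons c tl ih =>
    by_cases hcx : c = x
    · subst hcx; simp [ih]; omega
    · simp [hcx, ih]; omega

-- The dedup-and-count presentation of a multiset of chunks IS B's recursive partition.
theorem pvPartition_cons (m : String) (tl : List String) :
    pvPartition (m :: tl)
      = (m, ((m :: tl).length : Int) - ((tl.filter (fun c => c ≠ m)).length : Int))
          :: pvPartition (tl.filter (fun c => c ≠ m)) := by
  rw [pvPartition.eq_def]

theorem pvPartition_nil : pvPartition [] = [] := by
  rw [pvPartition.eq_def]

theorem dedup_count_eq_partition : ∀ (n : Nat) (l : List String), l.length ≤ n →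
    (PySem.List.dedup l).map (fun m => (m, (l.count m : Int))) = pvPartition l := by
  intro n
  induction n with
  | zero =>
    intro l hl
    have : l = [] := List.eq_nil_of_length_eq_zero (Nat.le_zero.mp hl)
    subst this
    simp [pvPartition_nil]
  | succ n ih =>
    intro l hl
    cases l with
    | nil => simp [pvPartition_nil]
    | cons x tl =>
      rw [pvPartition_cons, dedup_cons, List.map_cons]
      have hlenr : (tl.filter (fun c => c ≠ x)).length ≤ n := by
        have h1 := List.length_filter_le (fun c => decide (c ≠ x)) tl
        have h2 : tl.length ≤ n := by simpa using Nat.lt_succ_iff.mp (Nat.lt_of_lt_of_le (Nat.lt_succ_self _) (by simpa using hl))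
        omega
      congr 1
      · -- head entry: len(cs) - len(rest) = count of the head chunk
        have hsplit := length_filter_count x tl
        have hcnt : (x :: tl).count x = tl.count x + 1 := by simp
        simp only [hcnt, List.length_cons]
        congr 1
        push_cast
        omega
      · -- tail entries: counts in the full list agree with counts in the filtered rest
        rw [← ih _ hlenr]
        apply List.map_congr_left
        intro m hm
        have hmem : m ∈ tl.filter (fun c => c ≠ x) := by
          simpa [PySem.List.dedup_eq_ofList, PySem.Set.mem_ofList] using hm
        have hmx : m ≠ x := by
          have := List.of_mem_filter hmem
          simpa using this
        have hc1 : (x :: tl).count m = tl.count m := by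
          simp [Ne.symm hmx]
        have hc2 : List.count m (List.filter (fun c => !decide (c = x)) tl) = List.count m tl :=
          List.count_filter (by simp [hmx])
        simp [hc1, hc2]

-- Folding A's step over any chunk list yields, as items, the dedup-and-count list.
theorem fold_items_eq (l : List String) :
    (l.foldl stepA PySem.Dict.empty).items
      = (PySem.List.dedup l).map (fun m => (m, (l.count m : Int))) := by
  rw [stepA_eq_counter_step, PySem.Dict.foldl_insert_getD_add_one_eq_counter,
      PySem.Dict.items_counter]
  simp [PySem.List.dedup_eq_ofList]

-- ===== VERDICT (by name: the statement is the Claim_ definition above) =====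
theorem microsat_dict_func_spec : Claim_equal_microsat_dict_func := by
  intro genome repeat_length _ _
  unfold Spec_microsat_dict_func microsat_dict_func microsat_dict_func_alt
  show ((PySem.List.pyRange 0 (PySem.Str.len genome) repeat_length).foldl
          (fun d i => stepA d (PySem.Str.slice genome (some i) (some (i + repeat_length))))
          PySem.Dict.empty).items
      = pvPartition ((PySem.List.pyRange 0 (PySem.Str.len genome) repeat_length).map
          (fun i => PySem.Str.slice genome (some i) (some (i + repeat_length))))
  rw [← List.foldl_map, fold_items_eq]
  exact dedup_count_eq_partition _ _ (Nat.le_refl _)
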